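-- pv_equiv track=rewrite | github.com/irsbugs/pyqt6-help | pyqt6-help.py | analyse_dictionary
-- ===== SOURCE A (Python) =====
-- def analyse_dictionary(qt6_dict):
--
--     module_count = dir(qt6_dict)
--
--     count_0 = 0
--     count_1 = 0
--     count_2 = 0
--     for classes, classes_dict in qt6_dict.items():
--         count_0 += 1
--         for methods, method_list in classes_dict.items():
--             count_1 += 1
--             count_2 += len(method_list)
--
--     return "Modules:{} Classes:{} Methods:{}".format(count_0, count_1, count_2)
-- ===== SOURCE B (Python) =====
-- def _tally_one(classes_dict):
--     lens = [len(method_list) for method_list in classes_dict.values()]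
--     return (1, len(lens), sum(lens))
--
-- def _tally(class_dicts):
--     # divide and conquer: split in halves, combine the two count-triples
--     if not class_dicts:
--         return (0, 0, 0)
--     if len(class_dicts) == 1:
--         return _tally_one(class_dicts[0])
--     mid = len(class_dicts) // 2
--     a = _tally(class_dicts[:mid])
--     b = _tally(class_dicts[mid:])
--     return (a[0] + b[0], a[1] + b[1], a[2] + b[2])
--
-- def analyse_dictionary(qt6_dict):
--     c0, c1, c2 = _tally(list(qt6_dict.values()))
--     return "Modules:{} Classes:{} Methods:{}".format(c0, c1, c2)
-- ===== Notes on version B (the rewrite author's own statement) =====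
-- stated objective: alternative
-- what changed: Replaces A's single fused imperative loop with three mutable counters by a divide-and-conquer tally: the list of class dicts is recursively split in halves and the two count-triples are combined, with a base case computing one class's (1, #methods, total method-list lengths); the dead dir() line is dropped.
import Mathlib
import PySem

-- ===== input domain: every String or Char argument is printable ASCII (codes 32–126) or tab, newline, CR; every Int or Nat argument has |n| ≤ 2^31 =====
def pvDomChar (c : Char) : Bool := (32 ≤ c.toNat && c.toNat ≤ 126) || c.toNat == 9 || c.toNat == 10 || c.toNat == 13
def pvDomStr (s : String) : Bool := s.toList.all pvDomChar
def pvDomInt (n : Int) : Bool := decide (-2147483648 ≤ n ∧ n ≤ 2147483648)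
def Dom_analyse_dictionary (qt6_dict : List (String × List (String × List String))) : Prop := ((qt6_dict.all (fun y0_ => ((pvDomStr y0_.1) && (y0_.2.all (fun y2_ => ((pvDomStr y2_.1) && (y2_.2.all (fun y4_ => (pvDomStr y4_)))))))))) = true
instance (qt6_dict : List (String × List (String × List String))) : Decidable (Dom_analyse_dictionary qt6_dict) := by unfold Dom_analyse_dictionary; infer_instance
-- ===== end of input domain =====

-- B replaces A's single fused imperative loop with three counters by a divide-and-conquer
-- tally (split the class-dict list in halves, combine the two count-triples); the dead
-- dir() line is dropped; objective: alternative algorithm, same result.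

-- ===== PORT A =====
-- one fused pass: (count_0, count_1, count_2) threaded through nested loops
def analyse_dictionary (qt6_dict : List (String × List (String × List String))) : String :=
  let counts : Int × Int × Int :=
    qt6_dict.foldl
      (fun acc cls =>
        let acc := (acc.1 + 1, acc.2.1, acc.2.2)
        cls.2.foldl
          (fun a m => (a.1, a.2.1 + 1, a.2.2 + (m.2.length : Int)))
          acc)
      (0, 0, 0)
  "Modules:" ++ PySem.Int.toStr counts.1 ++ " Classes:" ++ PySem.Int.toStr counts.2.1 ++
    " Methods:" ++ PySem.Int.toStr counts.2.2

-- ===== PORT B =====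
-- port of _tally_one: one class dict's (1, #methods, total method-list lengths)
def pvTallyOne (cd : List (String × List String)) : Int × Int × Int :=
  let lens : List Int := cd.map (fun m => (m.2.length : Int))
  (1, (lens.length : Int), lens.sum)

-- port of _tally: divide and conquer on the list of class dicts
def pvTally : List (List (String × List String)) → Int × Int × Int
  | [] => (0, 0, 0)
  | [cd] => pvTallyOne cd
  | x :: y :: t =>
    let mid := (x :: y :: t).length / 2
    let a := pvTally ((x :: y :: t).take mid)
    let b := pvTally ((x :: y :: t).drop mid)
    (a.1 + b.1, a.2.1 + b.2.1, a.2.2 + b.2.2)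
  termination_by cds => cds.length
  decreasing_by
  · simp [List.length_take]; omega
  · simp [List.length_drop]; omega

def analyse_dictionary_alt (qt6_dict : List (String × List (String × List String))) : String :=
  let c := pvTally (qt6_dict.map (fun p => p.2))
  "Modules:" ++ PySem.Int.toStr c.1 ++ " Classes:" ++ PySem.Int.toStr c.2.1 ++
    " Methods:" ++ PySem.Int.toStr c.2.2

-- ===== PRECONDITION & SPEC =====
def Spec_analyse_dictionary (qt6_dict : List (String × List (String × List String))) (out : String) : Prop := out = analyse_dictionary_alt qt6_dict
instance (qt6_dict : List (String × List (String × List String))) (out : String) : Decidable (Spec_analyse_dictionary qt6_dict out) := by unfold Spec_analyse_dictionary; infer_instance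

-- ===== CLAIM (what is proved, stated in full; the proofs are below) =====
def Claim_equal_analyse_dictionary : Prop := ∀ (qt6_dict : List (String × List (String × List String))), Dom_analyse_dictionary qt6_dict → Spec_analyse_dictionary qt6_dict (analyse_dictionary qt6_dict)

-- ===== LEMMAS AND PROOFS =====

theorem inner_foldl (cls : List (String × List String)) (a b c : Int) :
    cls.foldl (fun a m => (a.1, a.2.1 + 1, a.2.2 + (m.2.length : Int))) (a, b, c)
      = (a, b + cls.length, c + (cls.map (fun m => (m.2.length : Int))).sum) := by
  induction cls generalizing b c with
  | nil => simp
  | cons h t ih =>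
    simp [List.foldl, ih]
    constructor <;> ring

theorem outer_foldl (l : List (String × List (String × List String))) (a b c : Int) :
    l.foldl
      (fun acc cls =>
        let acc := (acc.1 + 1, acc.2.1, acc.2.2)
        cls.2.foldl (fun a m => (a.1, a.2.1 + 1, a.2.2 + (m.2.length : Int))) acc)
      (a, b, c)
      = (a + l.length,
         b + (l.map (fun cls => (cls.2.length : Int))).sum,
         c + (l.map (fun cls => (cls.2.map (fun m => (m.2.length : Int))).sum)).sum) := by
  induction l generalizing a b c with
  | nil => simp
  | cons h t ih =>
    simp [List.foldl, inner_foldl, ih]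
    refine ⟨by ring, by ring, by ring⟩

theorem tally_spec (m : List (List (String × List String))) :
    pvTally m
      = ((m.length : Int),
         (m.map (fun cd => (cd.length : Int))).sum,
         (m.map (fun cd => (cd.map (fun mm => (mm.2.length : Int))).sum)).sum) := by
  induction m using pvTally.induct with
  | case1 => simp [pvTally]
  | case2 cd => simp [pvTally, pvTallyOne]
  | case3 x y t mid ih1 ih2 =>
    rw [pvTally]
    rw [ih1, ih2]
    conv_rhs => rw [← List.take_append_drop ((x :: y :: t).length / 2) (x :: y :: t)]
    simp [List.length_take, List.length_drop]
    have hm : mid = (t.length + 2) / 2 := by simp [mid]; omega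
    omega

-- ===== VERDICT (by name: the statement is the Claim_ definition above) =====
theorem analyse_dictionary_spec : Claim_equal_analyse_dictionary := by
  intro qt6_dict _
  unfold Spec_analyse_dictionary analyse_dictionary analyse_dictionary_alt
  simp [outer_foldl, tally_spec, List.map_map, Function.comp_def]
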